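-- pv_equiv track=rewrite | github.com/arash-shahmansoori/precept-framework | scripts/comprehensive_fix.py | fix_blockquote
-- ===== SOURCE A (Python) =====
-- def fix_blockquote(tex: str) -> str:
--     """Convert markdown-style blockquotes to LaTeX."""
--     # Fix any remaining > blockquotes
--     lines = tex.split('\n')
--     in_quote = False
--     new_lines = []
--
--     for line in lines:
--         if line.startswith('> '):
--             if not in_quote:
--                 new_lines.append('\\begin{quote}')
--                 in_quote = True
--             new_lines.append(line[2:])
--         else:
--             if in_quote:
--                 new_lines.append('\\end{quote}')
--                 in_quote = False
--             new_lines.append(line)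
--
--     if in_quote:
--         new_lines.append('\\end{quote}')
--
--     return '\n'.join(new_lines)
-- ===== SOURCE B (Python) =====
-- def fix_blockquote(tex: str) -> str:
--     """Convert markdown-style blockquotes to LaTeX."""
--     # Group runs of consecutive '> ' lines and wrap each run in a quote
--     # environment, instead of threading an in_quote flag through the loop.
--     lines = tex.split('\n')
--     out = []
--     i, n = 0, len(lines)
--     while i < n:
--         if lines[i].startswith('> '):
--             j = i + 1
--             while j < n and lines[j].startswith('> '):
--                 j += 1
--             out.append('\\begin{quote}')
--             out.extend(line[2:] for line in lines[i:j])
--             out.append('\\end{quote}')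
--             i = j
--         else:
--             out.append(lines[i])
--             i += 1
--     return '\n'.join(out)
-- ===== Notes on version B (the rewrite author's own statement) =====
-- stated objective: alternative
-- what changed: Replaces the in_quote boolean state machine with run-grouping: an outer loop that, on meeting a blockquote line, scans the whole run of consecutive blockquote lines at once and emits the complete quote environment for it, so no flag is carried across iterations and no trailing close-up step is needed.
import Mathlib
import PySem

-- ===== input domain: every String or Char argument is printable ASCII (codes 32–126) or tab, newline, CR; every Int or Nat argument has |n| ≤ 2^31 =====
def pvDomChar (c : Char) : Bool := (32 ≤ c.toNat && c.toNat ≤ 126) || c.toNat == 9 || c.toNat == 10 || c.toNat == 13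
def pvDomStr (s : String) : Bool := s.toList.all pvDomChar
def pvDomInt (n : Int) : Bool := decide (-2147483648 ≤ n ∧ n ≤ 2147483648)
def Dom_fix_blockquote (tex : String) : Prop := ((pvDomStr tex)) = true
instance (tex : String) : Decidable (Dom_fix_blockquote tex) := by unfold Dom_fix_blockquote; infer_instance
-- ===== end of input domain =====

-- B replaces A's in_quote flag machine with explicit grouping of runs of blockquote lines; same cost, different decomposition.

-- ===== PORT A =====
-- one iteration of A's for-loop over (in_quote, new_lines)
def fbStepA (st : Bool × List String) (line : String) : Bool × List String :=
  if PySem.Str.startswith line "> " then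
    let nl := if !st.1 then st.2 ++ ["\\begin{quote}"] else st.2
    (true, nl ++ [PySem.Str.slice line (some 2) none])
  else
    let nl := if st.1 then st.2 ++ ["\\end{quote}"] else st.2
    (false, nl ++ [line])

def fix_blockquote (tex : String) : String :=
  let lines := (PySem.Str.split? tex "\n").getD []   -- sep "\n" ≠ "": split? is always some here
  let st := lines.foldl fbStepA (false, [])
  let newLines := if st.1 then st.2 ++ ["\\end{quote}"] else st.2
  PySem.Str.join "\n" newLines

-- ===== PORT B =====
-- B's outer while over the remaining suffix of lines; the inner j-scan over the
-- current run of blockquote lines is takeWhile/dropWhile on that suffix (lines[i:j] / advance i to j).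
def fbGoB (lines : List String) : List String :=
  match lines with
  | [] => []
  | l :: rest =>
    if PySem.Str.startswith l "> " then
      "\\begin{quote}" ::
        ((l :: rest.takeWhile (fun x => PySem.Str.startswith x "> ")).map
          (fun x => PySem.Str.slice x (some 2) none)) ++
        "\\end{quote}" :: fbGoB (rest.dropWhile (fun x => PySem.Str.startswith x "> "))
    else
      l :: fbGoB rest
termination_by lines.length
decreasing_by
  · simpa using Nat.lt_succ_of_le (List.length_dropWhile_le _ rest)
  · simp

def fix_blockquote_alt (tex : String) : String :=
  PySem.Str.join "\n" (fbGoB ((PySem.Str.split? tex "\n").getD []))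

-- ===== PRECONDITION & SPEC =====
def Spec_fix_blockquote (tex : String) (out : String) : Prop := out = fix_blockquote_alt tex
instance (tex : String) (out : String) : Decidable (Spec_fix_blockquote tex out) := by unfold Spec_fix_blockquote; infer_instance

-- ===== CLAIM (what is proved, stated in full; the proofs are below) =====
def Claim_equal_fix_blockquote : Prop := ∀ (tex : String), Dom_fix_blockquote tex → Spec_fix_blockquote tex (fix_blockquote tex)

-- ===== LEMMAS AND PROOFS =====

-- output A's state machine still emits when entered with flag q and the given remaining lines
def fbRunA (q : Bool) : List String → List String
  | [] => if q then ["\\end{quote}"] else []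
  | l :: rest =>
    if PySem.Str.startswith l "> " then
      (if q then [] else ["\\begin{quote}"]) ++ PySem.Str.slice l (some 2) none :: fbRunA true rest
    else
      (if q then ["\\end{quote}"] else []) ++ l :: fbRunA false rest

theorem fbFoldA_eq_run (ls : List String) : ∀ (q : Bool) (acc : List String),
    (if (ls.foldl fbStepA (q, acc)).1 then (ls.foldl fbStepA (q, acc)).2 ++ ["\\end{quote}"]
     else (ls.foldl fbStepA (q, acc)).2) = acc ++ fbRunA q ls := by
  induction ls with
  | nil => intro q acc; cases q <;> simp [fbRunA]
  | cons l rest ih =>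
    intro q acc
    by_cases h : PySem.Chars.startswith l.toList ['>', ' '] = true <;> cases q <;>
      simp [fbStepA, fbRunA, h, ih]

theorem fbRunA_true (ls : List String) :
    fbRunA true ls =
      (ls.takeWhile (fun x => PySem.Str.startswith x "> ")).map
        (fun x => PySem.Str.slice x (some 2) none) ++
      "\\end{quote}" :: fbRunA false (ls.dropWhile (fun x => PySem.Str.startswith x "> ")) := by
  induction ls with
  | nil => simp [fbRunA]
  | cons l rest ih =>
    by_cases h : PySem.Chars.startswith l.toList ['>', ' '] = true <;>
      simp [fbRunA, h, ih]

theorem fbRunA_false_eq_goB (ls : List String) : fbRunA false ls = fbGoB ls := by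
  induction hn : ls.length using Nat.strong_induction_on generalizing ls with
  | _ n ih =>
    cases ls with
    | nil => simp [fbRunA, fbGoB]
    | cons l rest =>
      by_cases h : PySem.Chars.startswith l.toList ['>', ' '] = true
      · rw [fbGoB]
        have hd : (rest.dropWhile (fun x => PySem.Chars.startswith x.toList ['>', ' '])).length < n := by
          have := List.length_dropWhile_le (fun x => PySem.Chars.startswith x.toList ['>', ' ']) rest
          simp at hn; omega
        simp [fbRunA, h, fbRunA_true]
        exact ih _ hd _ rfl
      · rw [fbGoB]
        have hd : rest.length < n := by simp at hn; omega
        simp [fbRunA, h, ih _ hd rest rfl]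

-- ===== VERDICT (by name: the statement is the Claim_ definition above) =====
theorem fix_blockquote_spec : Claim_equal_fix_blockquote := by
  intro tex _
  simp only [Spec_fix_blockquote, fix_blockquote, fix_blockquote_alt, fbFoldA_eq_run,
    fbRunA_false_eq_goB, List.nil_append]
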